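-- pv_equiv track=rewrite | github.com/JonathanSomer/structural-biology-machine-learning-project | utils/pdb_utils.py | get_joint_positions_from_alignment
-- ===== SOURCE A (Python) =====
-- def get_joint_positions_from_alignment(align1, align2, score, begin, end):
--     """format_alignment(align1, align2, score, begin, end) -> string
--     Format the alignment prettily into a list of tuples of the identical residues.
--     """
--     lst = []
--     i, align1_index, align2_index = 0, 0, 0
--     while i < len(align1):
--         if align1[i] == align2[i]:
--             lst.append((align1_index, align2_index))
--         if align1[i] != "-":
--             align1_index += 1
--         if align2[i] != "-":
--             align2_index += 1
--         i += 1
--     return lst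
-- ===== SOURCE B (Python) =====
-- def get_joint_positions_from_alignment(align1, align2, score, begin, end):
--     """Prefix-count decomposition: first build prefix arrays of non-gap counts,
--     then emit (pos1[i], pos2[i]) for each matching column in one comprehension."""
--     n = len(align1)
--     pos1 = [0] * (n + 1)
--     pos2 = [0] * (n + 1)
--     for i in range(n):
--         pos1[i + 1] = pos1[i] + (align1[i] != "-")
--         pos2[i + 1] = pos2[i] + (align2[i] != "-")
--     return [(pos1[i], pos2[i]) for i in range(n) if align1[i] == align2[i]]
-- ===== Notes on version B (the rewrite author's own statement) =====
-- stated objective: alternative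
-- what changed: Replaces the single interleaved while-loop carrying two running counters by two phases: a prefix-count pass building pos1/pos2 arrays of non-gap counts, then a filtering comprehension emitting (pos1[i], pos2[i]) at matching columns.
import Mathlib
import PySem

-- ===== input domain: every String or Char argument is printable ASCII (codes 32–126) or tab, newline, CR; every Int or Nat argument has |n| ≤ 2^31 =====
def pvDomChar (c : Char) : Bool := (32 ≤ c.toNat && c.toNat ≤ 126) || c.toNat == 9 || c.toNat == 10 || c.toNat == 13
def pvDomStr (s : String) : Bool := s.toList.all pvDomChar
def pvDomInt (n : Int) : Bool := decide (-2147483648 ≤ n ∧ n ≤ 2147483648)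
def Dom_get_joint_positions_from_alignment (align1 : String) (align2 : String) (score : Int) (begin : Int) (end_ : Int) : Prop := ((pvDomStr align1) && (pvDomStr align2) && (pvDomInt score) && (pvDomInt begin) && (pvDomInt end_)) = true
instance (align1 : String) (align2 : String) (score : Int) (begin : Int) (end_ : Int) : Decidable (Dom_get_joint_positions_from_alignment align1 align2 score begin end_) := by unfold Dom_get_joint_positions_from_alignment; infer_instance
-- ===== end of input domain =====

-- B restructures A's interleaved while-loop as a prefix-count pass plus a filtering comprehension (alternative decomposition, same cost).

-- ===== PORT A =====
-- while i < len(align1): indexing align1[i]/align2[i] with interleaved counters; recursion over both char lists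
def pvGoA : List Char → List Char → Int → Int → List (Int × Int)
  | c1 :: r1, c2 :: r2, a1, a2 =>
      (if c1 = c2 then [(a1, a2)] else []) ++
      pvGoA r1 r2 (if c1 ≠ '-' then a1 + 1 else a1) (if c2 ≠ '-' then a2 + 1 else a2)
  | _, _, _, _ => []

def get_joint_positions_from_alignment (align1 : String) (align2 : String) (score : Int) (begin : Int) (end_ : Int) : List (Int × Int) :=
  pvGoA align1.toList align2.toList 0 0

-- ===== PORT B =====
-- pos arrays: prefix counts of non-gap characters (Python's pos1/pos2, built by the first pass)
def pvScan (a : Int) (l : List Char) : List Int :=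
  l.scanl (fun acc c => acc + (if c ≠ '-' then 1 else 0)) a

def get_joint_positions_from_alignment_alt (align1 : String) (align2 : String) (score : Int) (begin : Int) (end_ : Int) : List (Int × Int) :=
  let l1 := align1.toList
  let l2 := align2.toList
  let n := l1.length
  let pos1 := pvScan 0 l1
  let pos2 := pvScan 0 (l2.take n)
  (List.range n).filterMap (fun i =>
    if l1.getD i ' ' = l2.getD i ' ' then some (pos1.getD i 0, pos2.getD i 0) else none)

-- ===== PRECONDITION & SPEC =====
-- Pre_ excludes len(align2) < len(align1); there both A and B raise IndexError at the first column past align2.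
def Pre_get_joint_positions_from_alignment (align1 : String) (align2 : String) (score : Int) (begin : Int) (end_ : Int) : Prop :=
  align1.toList.length ≤ align2.toList.length
instance (align1 : String) (align2 : String) (score : Int) (begin : Int) (end_ : Int) : Decidable (Pre_get_joint_positions_from_alignment align1 align2 score begin end_) := by unfold Pre_get_joint_positions_from_alignment; infer_instance

def pvWitness_get_joint_positions_from_alignment : String × String × Int × Int × Int := ("AB-C", "A-BC", 0, 0, 0)

def Spec_get_joint_positions_from_alignment (align1 : String) (align2 : String) (score : Int) (begin : Int) (end_ : Int) (out : List (Int × Int)) : Prop := out = get_joint_positions_from_alignment_alt align1 align2 score begin end_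
instance (align1 : String) (align2 : String) (score : Int) (begin : Int) (end_ : Int) (out : List (Int × Int)) : Decidable (Spec_get_joint_positions_from_alignment align1 align2 score begin end_ out) := by unfold Spec_get_joint_positions_from_alignment; infer_instance

-- ===== CLAIM (what is proved, stated in full; the proofs are below) =====
def Claim_equal_get_joint_positions_from_alignment : Prop := ∀ (align1 : String) (align2 : String) (score : Int) (begin : Int) (end_ : Int), Dom_get_joint_positions_from_alignment align1 align2 score begin end_ → Pre_get_joint_positions_from_alignment align1 align2 score begin end_ → Spec_get_joint_positions_from_alignment align1 align2 score begin end_ (get_joint_positions_from_alignment align1 align2 score begin end_)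

-- ===== LEMMAS AND PROOFS =====
lemma pvGoA_eq (l1 : List Char) : ∀ (l2 : List Char) (a1 a2 : Int), l1.length ≤ l2.length →
    pvGoA l1 l2 a1 a2 =
      (List.range l1.length).filterMap (fun i =>
        if l1.getD i ' ' = l2.getD i ' '
        then some ((pvScan a1 l1).getD i 0, (pvScan a2 (l2.take l1.length)).getD i 0)
        else none) := by
  induction l1 with
  | nil => intro l2 a1 a2 _; simp [pvGoA]
  | cons c1 r1 ih =>
    intro l2 a1 a2 h
    cases l2 with
    | nil => simp at h
    | cons c2 r2 =>
      simp only [List.length_cons, List.range_succ_eq_map, List.filterMap_cons,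
        List.filterMap_map]
      rw [pvGoA, ih r2 _ _ (by simpa using h)]
      simp only [pvScan, List.take_succ_cons, List.scanl]
      have hacc : ∀ (a : Int) (c : Char), (if c = '-' then a else a + 1) = a + (if c = '-' then 0 else 1) := by
        intro a c; split_ifs <;> ring
      by_cases hc : c1 = c2 <;> simp [hc, hacc]

-- ===== VERDICT (by name: the statement is the Claim_ definition above) =====
theorem get_joint_positions_from_alignment_spec : Claim_equal_get_joint_positions_from_alignment := by
  intro a1 a2 s b e _ hpre
  unfold Spec_get_joint_positions_from_alignment get_joint_positions_from_alignment
    get_joint_positions_from_alignment_alt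
  exact pvGoA_eq _ _ _ _ hpre
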